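-- pv_equiv track=rewrite | github.com/Abercus/devianceminingthesis | DevianceMiningPipeline/ddm_newmethod_fixed_new.py | get_data_snapshots
-- ===== SOURCE A (Python) =====
-- def get_data_snapshots(trace, fulfilled, violated):
--     positive_snapshots = []
--     negative_snapshots = []
--
--     pos_locs = set(fulfilled)
--     neg_locs = set(violated)
--
--     current_snap = {}
--     for i, event_data in enumerate(trace["data"]):
--         for k, val in event_data.items():
--             current_snap[k] = val
--
--         if i in pos_locs:
--             positive_snapshots.append(dict(current_snap))
--         elif i in neg_locs:
--             negative_snapshots.append(dict(current_snap))
--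
--
--     return positive_snapshots, negative_snapshots
-- ===== SOURCE B (Python) =====
-- def get_data_snapshots(trace, fulfilled, violated):
--     # Pass 1: build all cumulative snapshots (a fresh dict per index).
--     snapshots = []
--     snap = {}
--     for event_data in trace["data"]:
--         snap = {**snap, **event_data}
--         snapshots.append(snap)
--
--     # Pass 2: select by index; violated only when not also fulfilled (the elif).
--     pos = set(fulfilled)
--     neg = set(violated)
--     positive = [s for i, s in enumerate(snapshots) if i in pos]
--     negative = [s for i, s in enumerate(snapshots) if i in neg and i not in pos]
--     return positive, negative
-- ===== Notes on version B (the rewrite author's own statement) =====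
-- stated objective: alternative
-- what changed: A interleaves selection with building (one loop with an elif appending copies as the running dict grows); B decomposes it into two passes: first build the full list of cumulative snapshots, then select positive/negative snapshots by index membership with comprehensions.
import Mathlib
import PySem

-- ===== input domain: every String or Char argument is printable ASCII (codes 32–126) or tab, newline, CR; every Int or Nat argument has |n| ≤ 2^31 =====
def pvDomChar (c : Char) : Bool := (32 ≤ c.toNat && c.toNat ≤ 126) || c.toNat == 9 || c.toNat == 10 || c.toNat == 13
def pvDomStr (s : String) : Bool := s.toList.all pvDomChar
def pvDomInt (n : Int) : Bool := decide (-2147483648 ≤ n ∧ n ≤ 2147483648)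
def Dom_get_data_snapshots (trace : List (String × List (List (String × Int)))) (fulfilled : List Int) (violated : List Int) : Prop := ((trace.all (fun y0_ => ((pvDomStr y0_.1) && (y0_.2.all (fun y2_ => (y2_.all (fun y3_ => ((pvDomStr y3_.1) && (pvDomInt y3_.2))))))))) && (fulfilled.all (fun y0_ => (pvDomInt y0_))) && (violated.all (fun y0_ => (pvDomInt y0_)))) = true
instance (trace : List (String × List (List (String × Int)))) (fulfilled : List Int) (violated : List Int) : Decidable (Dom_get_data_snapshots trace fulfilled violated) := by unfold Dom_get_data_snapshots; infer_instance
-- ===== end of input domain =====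

-- B replaces A's single selecting-while-building loop by two passes (build all cumulative
-- snapshots, then select by index membership); same asymptotic cost, different decomposition.

-- ===== PORT A =====
def get_data_snapshots (trace : List (String × List (List (String × Int)))) (fulfilled : List Int) (violated : List Int) : (List (List (String × Int))) × (List (List (String × Int))) :=
  let pos_locs : PySem.Set Int := PySem.Set.ofList fulfilled
  let neg_locs : PySem.Set Int := PySem.Set.ofList violated
  let st := (PySem.List.enumerate (PySem.Dict.getD ⟨trace⟩ "data" [])).foldl
    (fun (st : List (List (String × Int)) × List (List (String × Int)) × PySem.Dict String Int)
         (p : Int × List (String × Int)) =>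
      let snap := p.2.foldl (fun (d : PySem.Dict String Int) kv => d.insert kv.1 kv.2) st.2.2
      if PySem.Set.contains pos_locs p.1 then (st.1 ++ [snap.items], st.2.1, snap)
      else if PySem.Set.contains neg_locs p.1 then (st.1, st.2.1 ++ [snap.items], snap)
      else (st.1, st.2.1, snap))
    ([], [], PySem.Dict.empty)
  (st.1, st.2.1)

-- ===== PORT B =====
def get_data_snapshots_alt (trace : List (String × List (List (String × Int)))) (fulfilled : List Int) (violated : List Int) : (List (List (String × Int))) × (List (List (String × Int))) :=
  -- pass 1: all cumulative snapshots
  let acc := (PySem.Dict.getD ⟨trace⟩ "data" []).foldl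
    (fun (acc : List (List (String × Int)) × PySem.Dict String Int) (ev : List (String × Int)) =>
      let snap := ev.foldl (fun (d : PySem.Dict String Int) kv => d.insert kv.1 kv.2) acc.2
      (acc.1 ++ [snap.items], snap))
    ([], PySem.Dict.empty)
  let snapshots := acc.1
  -- pass 2: selection by index membership
  let pos : PySem.Set Int := PySem.Set.ofList fulfilled
  let neg : PySem.Set Int := PySem.Set.ofList violated
  (((PySem.List.enumerate snapshots).filter (fun p => PySem.Set.contains pos p.1)).map (·.2),
   ((PySem.List.enumerate snapshots).filter (fun p => PySem.Set.contains neg p.1 && !PySem.Set.contains pos p.1)).map (·.2))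

-- ===== PRECONDITION & SPEC =====
-- Pre_ excludes exactly the traces with no "data" key, on which the Python A raises KeyError.
def Pre_get_data_snapshots (trace : List (String × List (List (String × Int)))) (fulfilled : List Int) (violated : List Int) : Prop :=
  "data" ∈ trace.map Prod.fst
instance (trace : List (String × List (List (String × Int)))) (fulfilled : List Int) (violated : List Int) : Decidable (Pre_get_data_snapshots trace fulfilled violated) := by unfold Pre_get_data_snapshots; infer_instance

def pvWitness_get_data_snapshots : (List (String × List (List (String × Int)))) × List Int × List Int :=
  ([("data", [[("a", 1)], [("b", 2), ("a", 3)]])], [0], [1])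

def Spec_get_data_snapshots (trace : List (String × List (List (String × Int)))) (fulfilled : List Int) (violated : List Int) (out : (List (List (String × Int))) × (List (List (String × Int)))) : Prop := out = get_data_snapshots_alt trace fulfilled violated
instance (trace : List (String × List (List (String × Int)))) (fulfilled : List Int) (violated : List Int) (out : (List (List (String × Int))) × (List (List (String × Int)))) : Decidable (Spec_get_data_snapshots trace fulfilled violated out) := by unfold Spec_get_data_snapshots; infer_instance

-- ===== CLAIM (what is proved, stated in full; the proofs are below) =====
def Claim_equal_get_data_snapshots : Prop := ∀ (trace : List (String × List (List (String × Int)))) (fulfilled : List Int) (violated : List Int), Dom_get_data_snapshots trace fulfilled violated → Pre_get_data_snapshots trace fulfilled violated → Spec_get_data_snapshots trace fulfilled violated (get_data_snapshots trace fulfilled violated)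

-- ===== LEMMAS AND PROOFS =====

-- the merged dict after one event, and the list of cumulative snapshots from a start dict
def pvMerge (d : PySem.Dict String Int) (ev : List (String × Int)) : PySem.Dict String Int :=
  ev.foldl (fun (d : PySem.Dict String Int) kv => d.insert kv.1 kv.2) d

def pvSnaps (d : PySem.Dict String Int) : List (List (String × Int)) → List (List (String × Int))
  | [] => []
  | ev :: t => (pvMerge d ev).items :: pvSnaps (pvMerge d ev) t

def pvLast (d : PySem.Dict String Int) : List (List (String × Int)) → PySem.Dict String Int
  | [] => d
  | ev :: t => pvLast (pvMerge d ev) t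

lemma pvB_fold (data : List (List (String × Int))) :
    ∀ (acc : List (List (String × Int))) (d : PySem.Dict String Int),
    data.foldl
      (fun (acc : List (List (String × Int)) × PySem.Dict String Int) (ev : List (String × Int)) =>
        let snap := ev.foldl (fun (d : PySem.Dict String Int) kv => d.insert kv.1 kv.2) acc.2
        (acc.1 ++ [snap.items], snap))
      (acc, d) = (acc ++ pvSnaps d data, pvLast d data) := by
  induction data with
  | nil => intro acc d; simp [pvSnaps, pvLast]
  | cons ev t ih =>
    intro acc d
    simp only [List.foldl_cons, pvSnaps, pvLast]
    rw [ih]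
    simp [pvMerge, List.append_assoc]

lemma pvA_fold (P N : Int → Bool) (data : List (List (String × Int))) :
    ∀ (i : Int) (pA nA : List (List (String × Int))) (d : PySem.Dict String Int),
    (PySem.List.enumerate data i).foldl
      (fun (st : List (List (String × Int)) × List (List (String × Int)) × PySem.Dict String Int)
           (p : Int × List (String × Int)) =>
        let snap := p.2.foldl (fun (d : PySem.Dict String Int) kv => d.insert kv.1 kv.2) st.2.2
        if P p.1 then (st.1 ++ [snap.items], st.2.1, snap)
        else if N p.1 then (st.1, st.2.1 ++ [snap.items], snap)
        else (st.1, st.2.1, snap))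
      (pA, nA, d) =
    (pA ++ ((PySem.List.enumerate (pvSnaps d data) i).filter (fun p => P p.1)).map (·.2),
     nA ++ ((PySem.List.enumerate (pvSnaps d data) i).filter (fun p => N p.1 && !P p.1)).map (·.2),
     pvLast d data) := by
  induction data with
  | nil => intro i pA nA d; simp [pvSnaps, pvLast, PySem.List.enumerate_nil]
  | cons ev t ih =>
    intro i pA nA d
    simp only [pvSnaps, pvLast, PySem.List.enumerate_cons, List.foldl_cons, List.filter_cons]
    cases hP : P i with
    | true =>
      simp only [hP, if_true, Bool.not_true, Bool.and_false, if_false]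
      rw [ih]
      simp [pvMerge, List.append_assoc]
    | false =>
      cases hN : N i with
      | true =>
        simp only [hP, hN, if_false, if_true, Bool.not_false, Bool.and_true]
        rw [ih]
        simp [pvMerge, List.append_assoc]
      | false =>
        simp only [hP, hN, if_false, Bool.not_false, Bool.and_true, Bool.false_and]
        rw [ih]
        simp [pvMerge]

-- ===== VERDICT (by name: the statement is the Claim_ definition above) =====
theorem get_data_snapshots_spec : Claim_equal_get_data_snapshots := by
  intro trace fulfilled violated _ _
  unfold Spec_get_data_snapshots get_data_snapshots get_data_snapshots_alt
  simp only []
  rw [pvA_fold (fun x => PySem.Set.contains (PySem.Set.ofList fulfilled) x)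
        (fun x => PySem.Set.contains (PySem.Set.ofList violated) x),
      pvB_fold]
  simp
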